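-- pv_equiv track=rewrite | github.com/ZivWu1229/wghs-anony-discord | Get_Post.py | split_page
-- ===== SOURCE A (Python) =====
-- def split_page(text):
--     output=['']
--     line_counter=0
--     page=0
--     for v in text:
--         output[page]+=v
--         if v == '\n':
--             line_counter+=1
--         if line_counter >= 9:
--             page += 1
--             line_counter = 0
--             output.append('')
--
--     #delete empty page
--     if output[-1]=='':
--         output=output[:-1]
--     #delete unnecessary \n
--     for page,text in enumerate(output):
--         if text[len(text)-1]=='\n':
--             output[page]=output[page][:-1]
--     return output
-- ===== SOURCE B (Python) =====
-- def split_page(text):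
--     if text == '':
--         return []
--     lines = text.split('\n')
--     if lines[-1] == '':
--         lines.pop()
--     return ['\n'.join(lines[i:i+9]) for i in range(0, len(lines), 9)]
-- ===== Notes on version B (the rewrite author's own statement) =====
-- stated objective: faster
-- what changed: B replaces A's per-character scan (accumulating into the current page string with a newline counter, then post-dropping an empty last page and stripping trailing newlines) with a split-once-then-chunk pass: split the text into its lines, drop the single trailing empty line a final newline produces, and join each group of nine lines.
import Mathlib
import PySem

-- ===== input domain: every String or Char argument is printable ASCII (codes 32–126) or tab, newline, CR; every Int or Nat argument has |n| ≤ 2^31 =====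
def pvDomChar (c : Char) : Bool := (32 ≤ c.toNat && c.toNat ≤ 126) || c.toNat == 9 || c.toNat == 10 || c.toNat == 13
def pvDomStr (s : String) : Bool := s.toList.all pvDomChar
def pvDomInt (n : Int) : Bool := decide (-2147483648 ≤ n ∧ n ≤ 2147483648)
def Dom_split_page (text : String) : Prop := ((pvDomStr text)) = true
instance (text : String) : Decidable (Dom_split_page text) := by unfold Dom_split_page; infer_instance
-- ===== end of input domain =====

-- B splits the text into its list of lines once and chunks that list nine lines at a time,
-- replacing A's per-character accumulation with its newline counter; same return value.

-- ===== PORT A =====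
-- A-side helper: the body of A's per-character loop; state = (output pages, line_counter, page index)
def splitPageStep (st : List (List Char) × Int × Int) (v : Char) : List (List Char) × Int × Int :=
  let output := PySem.List.pySetD st.1 st.2.2 (PySem.List.pyGetD st.1 st.2.2 [] ++ [v])
  let line_counter := if v = '\n' then st.2.1 + 1 else st.2.1
  if line_counter ≥ 9 then (output ++ [[]], 0, st.2.2 + 1) else (output, line_counter, st.2.2)

def split_page (text : String) : List String :=
  let st := text.toList.foldl splitPageStep ([[]], 0, 0)
  -- delete empty page
  let output := if PySem.List.pyGet? st.1 (-1) = some ([] : List Char) then st.1.dropLast else st.1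
  -- delete unnecessary '\n'  (t[len(t)-1] never hits an empty t: only the dropped last page can be empty)
  output.map (fun t =>
    String.ofList (if PySem.List.pyGet? t ((t.length : Int) - 1) = some '\n' then t.dropLast else t))

-- ===== PORT B =====
def split_page_alt (text : String) : List String :=
  if text = "" then []
  else
    let lines0 := PySem.Chars.splitOn text.toList ['\n']
    let lines := if PySem.List.pyGet? lines0 (-1) = some ([] : List Char) then lines0.dropLast else lines0
    (PySem.List.pyRange 0 (lines.length : Int) 9).map
      (fun i => String.ofList (PySem.Chars.join ['\n'] (PySem.List.slice lines (some i) (some (i + 9)))))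

-- ===== PRECONDITION & SPEC =====
def Spec_split_page (text : String) (out : List String) : Prop := out = split_page_alt text
instance (text : String) (out : List String) : Decidable (Spec_split_page text out) := by unfold Spec_split_page; infer_instance

-- ===== CLAIM (what is proved, stated in full; the proofs are below) =====
def Claim_equal_split_page : Prop := ∀ (text : String), Dom_split_page text → Spec_split_page text (split_page text)

-- ===== LEMMAS AND PROOFS =====

-- abbreviations for the two joins used in the reasoning
def jNL (ls : List (List Char)) : List Char := PySem.Chars.join ['\n'] ls
def fJoin (ls : List (List Char)) : List Char := (ls.map (fun l => l ++ ['\n'])).flatten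

def stripNL (t : List Char) : List Char := if t.getLast? = some '\n' then t.dropLast else t
def postDrop (raw : List (List Char)) : List (List Char) :=
  if raw.getLast? = some ([] : List Char) then raw.dropLast else raw

-- structural rendering of A's loop
def goA : List Char → List (List Char) → List Char → Int → List (List Char)
  | [], acc, cur, _ => acc ++ [cur]
  | v :: rest, acc, cur, cnt =>
    let cnt' := if v = '\n' then cnt + 1 else cnt
    if cnt' ≥ 9 then goA rest (acc ++ [cur ++ [v]]) [] 0 else goA rest acc (cur ++ [v]) cnt'

-- A's raw pages, described on the line list: cur = current page, cnt = lines already in it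
def pages : List Char → Nat → List (List Char) → List (List Char)
  | cur, _, [] => [cur]
  | cur, _, [l] => [cur ++ l]
  | cur, cnt, l :: l2 :: ls =>
      if cnt + 1 ≥ 9 then (cur ++ l ++ ['\n']) :: pages [] 0 (l2 :: ls)
      else pages (cur ++ l ++ ['\n']) (cnt + 1) (l2 :: ls)

-- B's pages, described on the line list: chunks of nine lines, joined
def chunks : List (List Char) → List (List Char)
  | [] => []
  | l :: ls => jNL ((l :: ls).take 9) :: chunks ((l :: ls).drop 9)
  termination_by ls => ls.length
  decreasing_by simp

theorem pyGet?_neg_one_eq_getLast? {α : Type} (xs : List α) :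
    PySem.List.pyGet? xs (-1) = xs.getLast? := by
  rcases List.eq_nil_or_concat xs with h | ⟨ys, y, rfl⟩
  · subst h; rfl
  · rw [List.concat_eq_append, PySem.List.pyGet?_neg_one_append_singleton, List.getLast?_concat]

theorem pyGet?_len_sub_one {α : Type} (t : List α) :
    PySem.List.pyGet? t ((t.length : Int) - 1) = t.getLast? := by
  cases t with
  | nil => rfl
  | cons a s =>
    have h1 : ((a :: s).length : Int) - 1 = ((s.length : Nat) : Int) := by simp
    rw [h1, PySem.List.pyGet?_natCast, List.getLast?_eq_getElem?]
    simp

theorem go_splitOn (c : Char) : ∀ (fuel : Nat) (l cur : List Char) (acc : List (List Char)),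
    l.length < fuel →
    PySem.Chars.splitOn.go [c] fuel l cur acc
      = acc.reverse ++ (List.splitOnP (· == c) l).modifyHead (cur.reverse ++ ·) := by
  intro fuel
  induction fuel with
  | zero => intro l cur acc h; omega
  | succ fuel ih =>
    intro l cur acc h
    cases l with
    | nil => simp [PySem.Chars.splitOn.go, List.splitOnP_nil]
    | cons c' rest =>
      by_cases hc : c = c'
      · subst hc
        have hpre : List.isPrefixOf [c] (c :: rest) = true := by simp [List.isPrefixOf]
        simp only [PySem.Chars.splitOn.go, hpre, if_pos]
        rw [ih _ _ _ (by simpa using Nat.lt_of_succ_lt_succ h)]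
        simp [List.splitOnP_cons]
        obtain ⟨x, t, hx⟩ := List.exists_cons_of_ne_nil (List.splitOnP_ne_nil (· == c) rest)
        simp [hx]
      · have hpre : List.isPrefixOf [c] (c' :: rest) = false := by
          simp [List.isPrefixOf]; intro hh; first | exact hc hh | exact hc hh.symm
        simp only [PySem.Chars.splitOn.go, hpre, Bool.false_eq_true, if_neg, not_false_iff]
        rw [ih _ _ _ (by simpa using Nat.lt_of_succ_lt_succ h)]
        have hne : (c' == c) = false := by simp; intro hh; first | exact hc hh | exact hc hh.symm
        simp [List.splitOnP_cons, hne]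
        obtain ⟨x, t, hx⟩ := List.exists_cons_of_ne_nil (List.splitOnP_ne_nil (· == c) rest)
        simp [hx]

theorem splitOn_eq (cs : List Char) :
    PySem.Chars.splitOn cs ['\n'] = List.splitOnP (· == '\n') cs := by
  rw [PySem.Chars.splitOn, go_splitOn '\n' (cs.length + 1) cs [] [] (by omega)]
  obtain ⟨x, t, hx⟩ := List.exists_cons_of_ne_nil (List.splitOnP_ne_nil (· == '\n') cs)
  simp [hx]

theorem nlNotMem : ∀ (cs : List Char), ∀ l ∈ List.splitOnP (· == '\n') cs, '\n' ∉ l := by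
  intro cs
  induction cs with
  | nil => simp [List.splitOnP_nil]
  | cons v rest ih =>
    by_cases hv : v = '\n'
    · subst hv
      simp only [List.splitOnP_cons, beq_self_eq_true, if_pos]
      intro l hl
      rcases List.mem_cons.mp hl with rfl | hl
      · simp
      · exact ih l hl
    · have hne : (v == '\n') = false := by simpa using hv
      simp only [List.splitOnP_cons, hne, Bool.false_eq_true, if_neg, not_false_iff]
      obtain ⟨x, t, hx⟩ := List.exists_cons_of_ne_nil (List.splitOnP_ne_nil (· == '\n') rest)
      rw [hx]
      intro l hl
      rcases List.mem_cons.mp hl with rfl | hl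
      · intro hmem
        rcases List.mem_cons.mp hmem with h | h
        · exact hv h.symm
        · exact ih x (by simp [hx]) h
      · exact ih l (by simp [hx, hl])

theorem set_append_len {α : Type} (acc : List α) (a x : α) :
    (acc ++ [a]).set acc.length x = acc ++ [x] := by
  induction acc with
  | nil => rfl
  | cons b t ih => simp [List.set, ih]

theorem foldA : ∀ (cs : List Char) (acc : List (List Char)) (cur : List Char) (cnt : Int),
    (cs.foldl splitPageStep (acc ++ [cur], cnt, (acc.length : Int))).1 = goA cs acc cur cnt := by
  intro cs
  induction cs with
  | nil => intro acc cur cnt; simp [goA]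
  | cons v rest ih =>
    intro acc cur cnt
    have hget : PySem.List.pyGetD (acc ++ [cur]) ((acc.length : Int)) [] = cur := by
      rw [PySem.List.pyGetD_natCast, List.getD_append_right acc [cur] [] acc.length (le_refl _)]
      simp
    have hset : PySem.List.pySetD (acc ++ [cur]) ((acc.length : Int)) (cur ++ [v])
        = acc ++ [cur ++ [v]] := by
      rw [PySem.List.pySetD_natCast, set_append_len]
    simp only [List.foldl_cons, splitPageStep, hget, hset, goA]
    by_cases h9 : (if v = '\n' then cnt + 1 else cnt) ≥ 9
    · rw [if_pos h9, if_pos h9]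
      have hlen : ((acc.length : Int)) + 1 = (((acc ++ [cur ++ [v]]).length : Nat) : Int) := by
        simp
      rw [hlen]
      exact ih (acc ++ [cur ++ [v]]) [] 0
    · rw [if_neg h9, if_neg h9]
      exact ih acc (cur ++ [v]) _

theorem pages_modifyHead (v : Char) : ∀ (ls : List (List Char)) (cur : List Char) (cnt : Nat),
    ls ≠ [] → pages cur cnt (ls.modifyHead (v :: ·)) = pages (cur ++ [v]) cnt ls := by
  intro ls cur cnt hne
  match ls with
  | [] => exact absurd rfl hne
  | [l] => simp [pages]
  | l :: l2 :: ls => simp only [List.modifyHead, pages]; split_ifs <;> simp [pages]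

theorem goA_pages : ∀ (cs : List Char) (acc : List (List Char)) (cur : List Char) (cnt : Nat),
    cnt < 9 → goA cs acc cur (cnt : Int) = acc ++ pages cur cnt (List.splitOnP (· == '\n') cs) := by
  intro cs
  induction cs with
  | nil => intro acc cur cnt _; simp [goA, List.splitOnP_nil, pages]
  | cons v rest ih =>
    intro acc cur cnt hcnt
    obtain ⟨l2, ls, hx⟩ := List.exists_cons_of_ne_nil (List.splitOnP_ne_nil (· == '\n') rest)
    by_cases hv : v = '\n'
    · subst hv
      simp only [goA, if_pos rfl, List.splitOnP_cons, beq_self_eq_true, if_pos]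
      by_cases h9 : cnt + 1 ≥ 9
      · have h9' : ((cnt : Int) + 1 ≥ 9) := by push_cast; omega
        rw [if_pos h9', hx]
        have h0 : ((0 : Nat) : Int) = (0 : Int) := by norm_num
        rw [← h0, ih (acc ++ [cur ++ ['\n']]) [] 0 (by omega)]
        simp only [hx, pages, List.nil_append]
        rw [if_pos h9]
        simp
      · have h9' : ¬ ((cnt : Int) + 1 ≥ 9) := by push_cast; omega
        rw [if_neg h9']
        have hcast : (cnt : Int) + 1 = ((cnt + 1 : Nat) : Int) := by push_cast; ring
        rw [hcast, ih acc (cur ++ ['\n']) (cnt + 1) (by omega), hx]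
        simp only [pages, List.nil_append]
        rw [if_neg h9]
        simp
    · have hne : (v == '\n') = false := by simpa using hv
      have h9' : ¬ ((cnt : Int) ≥ 9) := by push_cast; omega
      simp only [goA, if_neg hv, if_neg h9', List.splitOnP_cons, hne, Bool.false_eq_true,
        if_neg, not_false_iff]
      rw [ih acc (cur ++ [v]) cnt hcnt,
        pages_modifyHead v _ cur cnt (List.splitOnP_ne_nil (· == '\n') rest)]

theorem pages_ne_nil : ∀ (cur : List Char) (cnt : Nat) (ls : List (List Char)),
    pages cur cnt ls ≠ [] := by
  intro cur cnt ls
  induction cur, cnt, ls using pages.induct <;> simp [pages] <;> split_ifs <;> simp_all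

theorem pages_spec : ∀ (ls : List (List Char)) (cur : List Char) (cnt : Nat),
    ls ≠ [] → cnt < 9 →
    pages cur cnt ls =
      if ls.length ≤ 9 - cnt then [cur ++ jNL ls]
      else (cur ++ fJoin (ls.take (9 - cnt))) :: pages [] 0 (ls.drop (9 - cnt)) := by
  intro ls
  induction ls with
  | nil => intro cur cnt h; exact absurd rfl h
  | cons l tail ih =>
    intro cur cnt _ hcnt
    cases tail with
    | nil =>
      have : (1 : Nat) ≤ 9 - cnt := by omega
      simp [pages, jNL, PySem.Chars.join_singleton, this]
    | cons l2 ls2 =>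
      by_cases h9 : cnt + 1 ≥ 9
      · have hc : cnt = 8 := by omega
        subst hc
        simp [pages, fJoin, jNL]
      · have htk : (l :: l2 :: ls2).take (9 - cnt) = l :: (l2 :: ls2).take (8 - cnt) := by
          have : 9 - cnt = (8 - cnt) + 1 := by omega
          simp [this]
        have hdp : (l :: l2 :: ls2).drop (9 - cnt) = (l2 :: ls2).drop (8 - cnt) := by
          have : 9 - cnt = (8 - cnt) + 1 := by omega
          simp [this]
        rw [pages, if_neg h9, ih (cur ++ l ++ ['\n']) (cnt + 1) (by simp) (by omega)]
        have hlen : (l :: l2 :: ls2).length ≤ 9 - cnt ↔ (l2 :: ls2).length ≤ 9 - (cnt + 1) := by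
          simp; omega
        by_cases hll : (l2 :: ls2).length ≤ 9 - (cnt + 1)
        · rw [if_pos hll, if_pos (hlen.mpr hll)]
          simp [jNL, PySem.Chars.join_cons_cons]
        · rw [if_neg hll, if_neg (fun h => hll (hlen.mp h)), htk, hdp]
          have h81 : 9 - (cnt + 1) = 8 - cnt := by omega
          rw [h81]
          simp [fJoin]

theorem getLast?_append_right {α : Type} (a b : List α) (h : b ≠ []) :
    (a ++ b).getLast? = b.getLast? := by
  rcases List.eq_nil_or_concat b with rfl | ⟨ys, y, rfl⟩
  · exact absurd rfl h
  · rw [List.concat_eq_append, ← List.append_assoc, List.getLast?_concat, List.getLast?_concat]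

theorem jNL_concat_nil : ∀ (ls : List (List Char)), ls ≠ [] → jNL (ls ++ [[]]) = jNL ls ++ ['\n'] := by
  intro ls
  induction ls with
  | nil => intro h; exact absurd rfl h
  | cons l tail ih =>
    intro _
    cases tail with
    | nil => simp [jNL, PySem.Chars.join_cons_cons, PySem.Chars.join_singleton]
    | cons l2 ls2 =>
      have := ih (by simp)
      simp only [List.cons_append, jNL, PySem.Chars.join_cons_cons] at *
      rw [this]
      simp

theorem jNL_last : ∀ (ls : List (List Char)) (l : List Char),
    ls.getLast? = some l → l ≠ [] →
    jNL ls ≠ [] ∧ (jNL ls).getLast? = l.getLast? := by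
  intro ls
  induction ls with
  | nil => intro l h; simp at h
  | cons x tail ih =>
    intro l hlast hne
    cases tail with
    | nil =>
      simp at hlast
      subst hlast
      simp [jNL, PySem.Chars.join_singleton, hne]
    | cons y ls2 =>
      have hlast' : (y :: ls2).getLast? = some l := by
        rw [← hlast]; simp [List.getLast?_cons_cons]
      obtain ⟨h1, h2⟩ := ih l hlast' hne
      constructor
      · simp [jNL, PySem.Chars.join_cons_cons]
      · have hj : jNL (x :: y :: ls2) = (x ++ ['\n']) ++ jNL (y :: ls2) := by
          rw [jNL, PySem.Chars.join_cons_cons]; simp [jNL]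
        rw [hj, getLast?_append_right _ _ h1]
        exact h2

theorem fJoin_eq : ∀ (ls : List (List Char)), ls ≠ [] → fJoin ls = jNL ls ++ ['\n'] := by
  intro ls
  induction ls with
  | nil => intro h; exact absurd rfl h
  | cons l tail ih =>
    intro _
    cases tail with
    | nil => simp [fJoin, jNL, PySem.Chars.join_singleton]
    | cons l2 ls2 =>
      have := ih (by simp)
      simp only [fJoin, jNL, PySem.Chars.join_cons_cons, List.map_cons, List.flatten_cons] at *
      rw [this]
      simp

theorem getLast?_drop_right {α : Type} (l : List α) (n : Nat) (h : l.drop n ≠ []) :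
    (l.drop n).getLast? = l.getLast? := by
  conv_rhs => rw [← List.take_append_drop n l]
  rw [getLast?_append_right _ _ h]

theorem postDrop_cons (p : List Char) (raw : List (List Char)) (h : raw ≠ []) :
    postDrop (p :: raw) = p :: postDrop raw := by
  rcases List.eq_nil_or_concat raw with rfl | ⟨ys, y, rfl⟩
  · exact absurd rfl h
  · rw [List.concat_eq_append]
    have h1 : (p :: (ys ++ [y])).getLast? = some y := by
      rw [← List.cons_append, List.getLast?_concat]
    have h2 : (ys ++ [y]).getLast? = some y := List.getLast?_concat
    rw [postDrop, postDrop, h1, h2]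
    by_cases hy : y = ([] : List Char)
    · subst hy
      rw [if_pos rfl, if_pos rfl, ← List.cons_append, List.dropLast_concat, List.dropLast_concat]
    · rw [if_neg (by simpa using hy), if_neg (by simpa using hy)]

theorem stripNL_fJoin (ls : List (List Char)) (h : ls ≠ []) :
    stripNL (fJoin ls) = jNL ls := by
  rw [stripNL, fJoin_eq ls h, List.getLast?_concat, if_pos rfl, List.dropLast_concat]

theorem stripNL_jNL (ls : List (List Char)) (l : List Char) (hlast : ls.getLast? = some l)
    (hne : l ≠ []) (hfree : '\n' ∉ l) : stripNL (jNL ls) = jNL ls := by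
  obtain ⟨_, h2⟩ := jNL_last ls l hlast hne
  rw [stripNL, h2, if_neg]
  intro hcon
  rcases List.eq_nil_or_concat l with rfl | ⟨ys, y, rfl⟩
  · exact hne rfl
  · rw [List.concat_eq_append, List.getLast?_concat] at hcon
    apply hfree
    simp at hcon
    simp [hcon]

-- A's postprocessed pages = B's chunks, when the last line is nonempty …
theorem L1 (ls : List (List Char)) (l : List Char) (hlast : ls.getLast? = some l)
    (hne : l ≠ []) (hfree : ∀ x ∈ ls, '\n' ∉ x) :
    (postDrop (pages [] 0 ls)).map stripNL = chunks ls := by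
  have hls : ls ≠ [] := by intro h; subst h; simp at hlast
  have hmem : l ∈ ls := by
    rcases List.eq_nil_or_concat ls with rfl | ⟨ys, y, rfl⟩
    · exact absurd rfl hls
    · rw [List.concat_eq_append, List.getLast?_concat] at hlast
      simp at hlast
      simp [hlast]
  obtain ⟨c, cs, hcons⟩ := List.exists_cons_of_ne_nil hls
  rw [pages_spec ls [] 0 hls (by omega)]
  by_cases hlen : ls.length ≤ 9 - 0
  · rw [if_pos hlen]
    have ⟨hj1, _⟩ := jNL_last ls l hlast hne
    have hpd : postDrop [[] ++ jNL ls] = [jNL ls] := by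
      rw [List.nil_append, postDrop]
      simp [hj1]
    rw [hpd, List.map_singleton, stripNL_jNL ls l hlast hne (hfree l hmem)]
    rw [hcons, chunks]
    rw [← hcons, List.take_of_length_le (by omega), List.drop_eq_nil_of_le (by omega), chunks]
  · rw [if_neg hlen]
    have hdne : ls.drop 9 ≠ [] := by
      intro h
      rw [List.drop_eq_nil_iff] at h
      omega
    have htne : ls.take 9 ≠ [] := by
      intro h
      rw [List.take_eq_nil_iff] at h
      rcases h with h | h
      · omega
      · exact hls h
    rw [List.nil_append, Nat.sub_zero,
      postDrop_cons _ _ (pages_ne_nil [] 0 (ls.drop 9)), List.map_cons,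
      stripNL_fJoin _ htne,
      L1 (ls.drop 9) l (by rw [getLast?_drop_right ls 9 hdne]; exact hlast) hne
        (fun x hx => hfree x (List.mem_of_mem_drop hx))]
    rw [hcons, chunks, ← hcons]
termination_by ls.length
decreasing_by
  have : ls.length > 9 := by omega
  simp
  omega

-- … and when the split produced a trailing empty line (text ended in '\n' or was empty)
theorem L2 (ls : List (List Char)) (hfree : ∀ x ∈ ls, '\n' ∉ x) :
    (postDrop (pages [] 0 (ls ++ [[]]))).map stripNL = chunks ls := by
  rcases List.eq_nil_or_concat ls with rfl | ⟨ys, y, hconc⟩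
  · simp [pages, postDrop, chunks]
  have hls : ls ≠ [] := by rw [hconc]; simp
  obtain ⟨c, cs, hcons⟩ := List.exists_cons_of_ne_nil hls
  rw [pages_spec (ls ++ [[]]) [] 0 (by simp) (by omega)]
  by_cases hlen : (ls ++ [[]]).length ≤ 9 - 0
  · rw [if_pos hlen]
    have hj : jNL (ls ++ [[]]) = jNL ls ++ ['\n'] := jNL_concat_nil ls hls
    have hpd : postDrop [[] ++ jNL (ls ++ [[]])] = [jNL (ls ++ [[]])] := by
      rw [List.nil_append, postDrop]
      simp [hj]
    rw [hpd, List.map_singleton, stripNL, hj, List.getLast?_concat, if_pos rfl,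
      List.dropLast_concat]
    rw [hcons, chunks, ← hcons]
    have hl8 : ls.length ≤ 8 := by simp at hlen; omega
    rw [List.take_of_length_le (by omega), List.drop_eq_nil_of_le (by omega), chunks]
  · rw [if_neg hlen]
    have hl9 : 9 ≤ ls.length := by simp at hlen; omega
    have htk : (ls ++ [[]]).take (9 - 0) = ls.take 9 := by
      rw [Nat.sub_zero, List.take_append_of_le_length hl9]
    have hdp : (ls ++ [[]]).drop (9 - 0) = ls.drop 9 ++ [[]] := by
      rw [Nat.sub_zero, List.drop_append_of_le_length hl9]
    have htne : ls.take 9 ≠ [] := by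
      intro h
      rw [List.take_eq_nil_iff] at h
      rcases h with h | h
      · omega
      · exact hls h
    rw [List.nil_append, htk, hdp,
      postDrop_cons _ _ (pages_ne_nil [] 0 (ls.drop 9 ++ [[]])), List.map_cons,
      stripNL_fJoin _ htne,
      L2 (ls.drop 9) (fun x hx => hfree x (List.mem_of_mem_drop hx))]
    rw [hcons, chunks, ← hcons]
termination_by ls.length
decreasing_by
  simp
  omega

theorem pyRange9_cons : ∀ (a b : Int), a < b →
    PySem.List.pyRange a b 9 = a :: PySem.List.pyRange (a + 9) b 9 := by
  intro a b hab
  rw [PySem.List.pyRange_of_pos a b (by norm_num), PySem.List.pyRange_of_pos (a + 9) b (by norm_num),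
    if_pos hab]
  have hsplit : (b - a + 9 - 1) / 9 = (b - (a + 9) + 9 - 1) / 9 + 1 := by
    have h1 : b - a + 9 - 1 = (b - (a + 9) + 9 - 1) + 1 * 9 := by ring
    rw [h1, Int.add_mul_ediv_right _ _ (by norm_num)]
  by_cases h9 : a + 9 < b
  · rw [if_pos h9, hsplit,
      Int.toNat_add (Int.ediv_nonneg (by omega) (by norm_num)) (by norm_num)]
    have h1t : Int.toNat 1 = 1 := rfl
    rw [h1t, List.range_succ_eq_map, List.map_cons, List.map_map]
    congr 1
    · simp
    · apply List.map_congr_left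
      intro k _
      simp
      push_cast
      ring
  · rw [if_neg h9]
    have hz : (b - (a + 9) + 9 - 1) / 9 = 0 := by
      apply Int.ediv_eq_zero_of_lt <;> omega
    rw [hsplit, hz]
    norm_num

theorem pyRange9_shift : ∀ (b : Int),
    PySem.List.pyRange 9 b 9 = (PySem.List.pyRange 0 (b - 9) 9).map (· + 9) := by
  intro b
  rw [PySem.List.pyRange_of_pos 9 b (by norm_num), PySem.List.pyRange_of_pos 0 (b - 9) (by norm_num),
    List.map_map]
  have hc : ((9 : Int) < b) ↔ ((0 : Int) < b - 9) := by omega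
  have harg : b - 9 + 9 - 1 = b - 9 - 0 + 9 - 1 := by ring
  by_cases h : (9 : Int) < b
  · rw [if_pos h, if_pos (hc.mp h), ← harg]
    apply List.map_congr_left
    intro k _
    simp
    ring
  · rw [if_neg h, if_neg (fun hh => h (hc.mpr hh))]
    simp

theorem chunkMap (ls : List (List Char)) :
    (PySem.List.pyRange 0 (ls.length : Int) 9).map
      (fun i => jNL (PySem.List.slice ls (some i) (some (i + 9)))) = chunks ls := by
  rcases List.eq_nil_or_concat ls with rfl | ⟨ys, y, hconc⟩
  · rw [PySem.List.pyRange_of_pos 0 _ (by norm_num)]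
    simp [chunks]
  have hls : ls ≠ [] := by rw [hconc]; simp
  obtain ⟨c, cs, hcons⟩ := List.exists_cons_of_ne_nil hls
  have hpos : (0 : Int) < (ls.length : Int) := by
    simp [hcons]
  rw [pyRange9_cons 0 _ hpos, List.map_cons]
  beta_reduce
  have hhead : jNL (PySem.List.slice ls (some 0) (some 9)) = jNL (ls.take 9) := by
    have h09 : (9 : Int) = ((9 : Nat) : Int) := by norm_num
    rw [h09, PySem.List.slice_zero_start, PySem.List.slice_to_natCast]
  have hzn : (0 : Int) + 9 = (9 : Int) := by norm_num
  rw [hzn, pyRange9_shift, List.map_map]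
  have hb : PySem.List.pyRange 0 ((ls.length : Int) - 9) 9
      = PySem.List.pyRange 0 (((ls.drop 9).length : Nat) : Int) 9 := by
    rw [List.length_drop]
    by_cases h9 : 9 ≤ ls.length
    · congr 1
      push_cast [h9]
      omega
    · rw [PySem.List.pyRange_of_pos 0 _ (by norm_num), PySem.List.pyRange_of_pos 0 _ (by norm_num),
        if_neg (by push_cast; omega), if_neg (by push_cast; omega)]
  have htail : (PySem.List.pyRange 0 ((ls.length : Int) - 9) 9).map
        ((fun i => jNL (PySem.List.slice ls (some i) (some (i + 9)))) ∘ (· + 9))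
      = (PySem.List.pyRange 0 (((ls.drop 9).length : Nat) : Int) 9).map
        (fun i => jNL (PySem.List.slice (ls.drop 9) (some i) (some (i + 9)))) := by
    rw [hb]
    apply List.map_congr_left
    intro i hi
    have hi0 : 0 ≤ i := by
      rcases (PySem.List.mem_pyRange_iff_of_pos (by norm_num : (0:Int) < 9) i).mp hi with ⟨h1, _⟩
      omega
    simp only [Function.comp]
    congr 1
    rw [PySem.List.slice_toNat ls (a := i + 9) (b := i + 9 + 9) (by omega) (by omega),
      PySem.List.slice_toNat (ls.drop 9) (a := i) (b := i + 9) (by omega) (by omega),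
      List.drop_drop]
    have e1 : (i + 9).toNat = i.toNat + 9 := by omega
    have e2 : (i + 9 + 9).toNat = i.toNat + 18 := by omega
    rw [e1, e2]
    have e3 : (9 + i.toNat) = i.toNat + 9 := by omega
    rw [e3]
    congr 1
    omega
  rw [hhead, htail, chunkMap (ls.drop 9), hcons, chunks, ← hcons]
termination_by ls.length
decreasing_by
  rw [hcons]
  simp

theorem A_eq (text : String) : split_page text
    = ((postDrop (pages [] 0 (List.splitOnP (· == '\n') text.toList))).map stripNL).map
        String.ofList := by
  rw [split_page]
  have ha := foldA text.toList [] [] 0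
  have hb := goA_pages text.toList [] [] 0 (by omega)
  simp only [List.nil_append, List.length_nil, Nat.cast_zero, Nat.cast_ofNat] at ha hb
  rw [ha, hb]
  have hstrip : ∀ t : List Char,
      (if PySem.List.pyGet? t ((t.length : Int) - 1) = some '\n' then t.dropLast else t)
        = stripNL t := by
    intro t
    rw [pyGet?_len_sub_one, stripNL]
  simp only [List.nil_append, pyGet?_neg_one_eq_getLast?, hstrip, List.map_map]
  rw [postDrop]
  rfl

theorem B_eq (text : String) (h : text ≠ "") : split_page_alt text
    = (chunks (if (List.splitOnP (· == '\n') text.toList).getLast? = some []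
        then (List.splitOnP (· == '\n') text.toList).dropLast
        else (List.splitOnP (· == '\n') text.toList))).map String.ofList := by
  rw [split_page_alt, if_neg h]
  simp only [splitOn_eq, pyGet?_neg_one_eq_getLast?]
  set L := if (List.splitOnP (· == '\n') text.toList).getLast? = some []
      then (List.splitOnP (· == '\n') text.toList).dropLast
      else (List.splitOnP (· == '\n') text.toList) with hL
  rw [← chunkMap L, List.map_map]
  apply List.map_congr_left
  intro i _
  simp [jNL]

-- ===== VERDICT (by name: the statement is the Claim_ definition above) =====
theorem split_page_spec : Claim_equal_split_page := by
  intro text _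
  unfold Spec_split_page
  by_cases htext : text = ""
  · subst htext
    decide
  · rw [A_eq, B_eq text htext]
    have hfree := nlNotMem text.toList
    have hnil : List.splitOnP (· == '\n') text.toList ≠ [] := List.splitOnP_ne_nil _ _
    rcases List.eq_nil_or_concat (List.splitOnP (· == '\n') text.toList) with h | ⟨ys, y, hys⟩
    · exact absurd h hnil
    rw [List.concat_eq_append] at hys
    have hlast : (List.splitOnP (· == '\n') text.toList).getLast? = some y := by
      rw [hys, List.getLast?_concat]
    by_cases h0 : (List.splitOnP (· == '\n') text.toList).getLast? = some []
    · have hy : y = [] := by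
        rw [hlast] at h0
        simpa using h0
      rw [if_pos h0, hys, List.dropLast_concat, hy]
      rw [L2 ys (fun x hx => hfree x (by rw [hys, hy]; exact List.mem_append_left _ hx))]
    · have hyne : y ≠ [] := by
        intro hcon
        exact h0 (by rw [hlast, hcon])
      rw [if_neg h0]
      rw [L1 (List.splitOnP (· == '\n') text.toList) y hlast hyne hfree]
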